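-- pv_equiv track=rewrite | github.com/ganadara135/CorridorRoad | freecad/Corridor_Road/ui/task_structure_editor.py | _structure_csv_mapping
-- ===== SOURCE A (Python) =====
-- def _norm_col(name):
--     return "".join(ch for ch in str(name or "").strip().lower() if ch.isalnum())
--
-- def _structure_csv_mapping(fieldnames):
--     cols = list(fieldnames or [])
--     by_norm = {_norm_col(c): c for c in cols}
--     aliases = {
--         "Id": ("id", "structureid"),
--         "Type": ("type", "structuretype"),
--         "StartStation": ("startstation", "startsta", "stationstart"),
--         "EndStation": ("endstation", "endsta", "stationend"),
--         "CenterStation": ("centerstation", "centersta", "stationcenter", "centrestation"),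
--         "Side": ("side",),
--         "Offset": ("offset",),
--         "Width": ("width",),
--         "Height": ("height",),
--         "BottomElevation": ("bottomelevation", "invert", "baseelevation"),
--         "Cover": ("cover",),
--         "RotationDeg": ("rotationdeg", "rotation", "angledeg"),
--         "BehaviorMode": ("behaviormode", "mode"),
--         "GeometryMode": ("geometrymode", "geomode"),
--         "TemplateName": ("templatename", "template", "structuretemplate"),
--         "WallThickness": ("wallthickness", "wall", "wallthk"),
--         "FootingWidth": ("footingwidth", "footing", "basewidth"),
--         "FootingThickness": ("footingthickness", "basethickness"),
--         "CapHeight": ("capheight", "cap", "topcapheight"),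
--         "CellCount": ("cellcount", "cells", "numberofcells"),
--         "CorridorMode": ("corridormode", "corridormodepolicy", "corridorpolicy", "corridormodevalue"),
--         "CorridorMargin": ("corridormargin", "margin", "voidmargin"),
--         "Notes": ("notes", "note", "remarks", "remark"),
--         "ShapeSourcePath": ("shapesourcepath", "shapepath", "sourcepath", "modelpath"),
--         "ScaleFactor": ("scalefactor", "scale"),
--         "PlacementMode": ("placementmode", "placemode"),
--         "UseSourceBaseAsBottom": ("usesourcebaseasbottom", "sourcebaseasbottom", "alignsourcebasetobottom"),
--     }
--     out = {}
--     for key, cand in aliases.items():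
--         hit = None
--         for a in cand:
--             k = _norm_col(a)
--             if k in by_norm:
--                 hit = by_norm[k]
--                 break
--         out[key] = hit
--     return out
-- ===== SOURCE B (Python) =====
-- def _norm_col(name):
--     return "".join(ch for ch in str(name or "").strip().lower() if ch.isalnum())
--
-- # Flat inverted index, precomputed as data: normalized alias -> (canonical key, rank of the
-- # alias within its key's priority tuple).  Correct because every alias in A's table is already
-- # a lowercase alphanumeric string, i.e. its own normal form.
-- _INDEX = {
--     'id': ('Id', 0),
--     'structureid': ('Id', 1),
--     'type': ('Type', 0),
--     'structuretype': ('Type', 1),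
--     'startstation': ('StartStation', 0),
--     'startsta': ('StartStation', 1),
--     'stationstart': ('StartStation', 2),
--     'endstation': ('EndStation', 0),
--     'endsta': ('EndStation', 1),
--     'stationend': ('EndStation', 2),
--     'centerstation': ('CenterStation', 0),
--     'centersta': ('CenterStation', 1),
--     'stationcenter': ('CenterStation', 2),
--     'centrestation': ('CenterStation', 3),
--     'side': ('Side', 0),
--     'offset': ('Offset', 0),
--     'width': ('Width', 0),
--     'height': ('Height', 0),
--     'bottomelevation': ('BottomElevation', 0),
--     'invert': ('BottomElevation', 1),
--     'baseelevation': ('BottomElevation', 2),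
--     'cover': ('Cover', 0),
--     'rotationdeg': ('RotationDeg', 0),
--     'rotation': ('RotationDeg', 1),
--     'angledeg': ('RotationDeg', 2),
--     'behaviormode': ('BehaviorMode', 0),
--     'mode': ('BehaviorMode', 1),
--     'geometrymode': ('GeometryMode', 0),
--     'geomode': ('GeometryMode', 1),
--     'templatename': ('TemplateName', 0),
--     'template': ('TemplateName', 1),
--     'structuretemplate': ('TemplateName', 2),
--     'wallthickness': ('WallThickness', 0),
--     'wall': ('WallThickness', 1),
--     'wallthk': ('WallThickness', 2),
--     'footingwidth': ('FootingWidth', 0),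
--     'footing': ('FootingWidth', 1),
--     'basewidth': ('FootingWidth', 2),
--     'footingthickness': ('FootingThickness', 0),
--     'basethickness': ('FootingThickness', 1),
--     'capheight': ('CapHeight', 0),
--     'cap': ('CapHeight', 1),
--     'topcapheight': ('CapHeight', 2),
--     'cellcount': ('CellCount', 0),
--     'cells': ('CellCount', 1),
--     'numberofcells': ('CellCount', 2),
--     'corridormode': ('CorridorMode', 0),
--     'corridormodepolicy': ('CorridorMode', 1),
--     'corridorpolicy': ('CorridorMode', 2),
--     'corridormodevalue': ('CorridorMode', 3),
--     'corridormargin': ('CorridorMargin', 0),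
--     'margin': ('CorridorMargin', 1),
--     'voidmargin': ('CorridorMargin', 2),
--     'notes': ('Notes', 0),
--     'note': ('Notes', 1),
--     'remarks': ('Notes', 2),
--     'remark': ('Notes', 3),
--     'shapesourcepath': ('ShapeSourcePath', 0),
--     'shapepath': ('ShapeSourcePath', 1),
--     'sourcepath': ('ShapeSourcePath', 2),
--     'modelpath': ('ShapeSourcePath', 3),
--     'scalefactor': ('ScaleFactor', 0),
--     'scale': ('ScaleFactor', 1),
--     'placementmode': ('PlacementMode', 0),
--     'placemode': ('PlacementMode', 1),
--     'usesourcebaseasbottom': ('UseSourceBaseAsBottom', 0),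
--     'sourcebaseasbottom': ('UseSourceBaseAsBottom', 1),
--     'alignsourcebasetobottom': ('UseSourceBaseAsBottom', 2),
-- }
--
-- _KEYS = ['Id', 'Type', 'StartStation', 'EndStation', 'CenterStation', 'Side', 'Offset', 'Width', 'Height', 'BottomElevation', 'Cover', 'RotationDeg', 'BehaviorMode', 'GeometryMode', 'TemplateName', 'WallThickness', 'FootingWidth', 'FootingThickness', 'CapHeight', 'CellCount', 'CorridorMode', 'CorridorMargin', 'Notes', 'ShapeSourcePath', 'ScaleFactor', 'PlacementMode', 'UseSourceBaseAsBottom']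
--
-- def _structure_csv_mapping(fieldnames):
--     # One pass over the columns: keep, per canonical key, the best (lowest-rank) match;
--     # on equal rank (same normalized form) the later column overwrites, like A's dict build.
--     best = {}
--     for col in (fieldnames or []):
--         hit = _INDEX.get(_norm_col(col))
--         if hit is not None:
--             key, rank = hit
--             prev = best.get(key)
--             if prev is None or rank <= prev[0]:
--                 best[key] = (rank, col)
--     return {key: (best[key][1] if key in best else None) for key in _KEYS}
-- ===== Notes on version B (the rewrite author's own statement) =====
-- stated objective: alternative
-- what changed: Replaces A's per-call nested scan of the alias table (first present alias per key against a norm->column dict) with a flat precomputed inverted index norm->(key,rank) and a single pass over the columns keeping the best (lowest rank, later column on ties) match per key.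
import Mathlib
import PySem

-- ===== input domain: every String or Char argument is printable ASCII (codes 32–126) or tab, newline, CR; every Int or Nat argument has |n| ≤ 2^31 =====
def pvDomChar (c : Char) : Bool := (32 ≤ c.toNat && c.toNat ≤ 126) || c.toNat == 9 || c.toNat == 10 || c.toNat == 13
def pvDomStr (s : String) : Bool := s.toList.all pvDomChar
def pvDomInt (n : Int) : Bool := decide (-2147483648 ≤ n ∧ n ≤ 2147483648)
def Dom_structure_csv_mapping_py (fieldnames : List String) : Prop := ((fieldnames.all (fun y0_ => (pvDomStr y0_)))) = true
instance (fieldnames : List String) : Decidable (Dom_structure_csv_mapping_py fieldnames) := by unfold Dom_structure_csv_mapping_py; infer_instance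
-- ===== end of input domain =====

set_option maxRecDepth 100000

-- B replaces A's per-call nested scan of the alias table by a flat precomputed inverted index
-- (normalized alias -> key, rank) and one pass over the columns (different decomposition; no speed claim).

-- ===== PORT A =====
-- _norm_col: "".join(ch for ch in str(name or "").strip().lower() if ch.isalnum())
-- (str(name or "") is the identity on str arguments; the join of the filtered chars is String.mk)
def normCol (s : String) : String :=
  String.mk ((PySem.Chars.lower (PySem.Chars.strip s.toList)).filter PySem.Chars.isalnum)

-- A's aliases dict literal, key -> priority tuple of aliases
def aliasTable : List (String × List String) :=
  [ ("Id", ["id", "structureid"]),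
    ("Type", ["type", "structuretype"]),
    ("StartStation", ["startstation", "startsta", "stationstart"]),
    ("EndStation", ["endstation", "endsta", "stationend"]),
    ("CenterStation", ["centerstation", "centersta", "stationcenter", "centrestation"]),
    ("Side", ["side"]),
    ("Offset", ["offset"]),
    ("Width", ["width"]),
    ("Height", ["height"]),
    ("BottomElevation", ["bottomelevation", "invert", "baseelevation"]),
    ("Cover", ["cover"]),
    ("RotationDeg", ["rotationdeg", "rotation", "angledeg"]),
    ("BehaviorMode", ["behaviormode", "mode"]),
    ("GeometryMode", ["geometrymode", "geomode"]),
    ("TemplateName", ["templatename", "template", "structuretemplate"]),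
    ("WallThickness", ["wallthickness", "wall", "wallthk"]),
    ("FootingWidth", ["footingwidth", "footing", "basewidth"]),
    ("FootingThickness", ["footingthickness", "basethickness"]),
    ("CapHeight", ["capheight", "cap", "topcapheight"]),
    ("CellCount", ["cellcount", "cells", "numberofcells"]),
    ("CorridorMode", ["corridormode", "corridormodepolicy", "corridorpolicy", "corridormodevalue"]),
    ("CorridorMargin", ["corridormargin", "margin", "voidmargin"]),
    ("Notes", ["notes", "note", "remarks", "remark"]),
    ("ShapeSourcePath", ["shapesourcepath", "shapepath", "sourcepath", "modelpath"]),
    ("ScaleFactor", ["scalefactor", "scale"]),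
    ("PlacementMode", ["placementmode", "placemode"]),
    ("UseSourceBaseAsBottom", ["usesourcebaseasbottom", "sourcebaseasbottom", "alignsourcebasetobottom"]) ]

-- inner loop of A: hit = None; for a in cand: k = _norm_col(a); if k in by_norm: hit = by_norm[k]; break
def firstHitA (by_norm : PySem.Dict String String) : List String → Option String
  | [] => none
  | a :: rest =>
    let k := normCol a
    if by_norm.contains k then by_norm.get? k else firstHitA by_norm rest

def structure_csv_mapping_py (fieldnames : List String) : List (String × Option String) :=
  let cols := fieldnames
  let by_norm := cols.foldl (fun d c => d.insert (normCol c) c) PySem.Dict.empty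
  (aliasTable.foldl (fun o kc => o.insert kc.1 (firstHitA by_norm kc.2)) PySem.Dict.empty).items

-- ===== PORT B =====
-- Source B's _INDEX literal: normalized alias -> (canonical key, rank within its key's tuple)
def invIdx : PySem.Dict String (String × Int) := PySem.Dict.ofList [
  ("id", ("Id", 0)),
  ("structureid", ("Id", 1)),
  ("type", ("Type", 0)),
  ("structuretype", ("Type", 1)),
  ("startstation", ("StartStation", 0)),
  ("startsta", ("StartStation", 1)),
  ("stationstart", ("StartStation", 2)),
  ("endstation", ("EndStation", 0)),
  ("endsta", ("EndStation", 1)),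
  ("stationend", ("EndStation", 2)),
  ("centerstation", ("CenterStation", 0)),
  ("centersta", ("CenterStation", 1)),
  ("stationcenter", ("CenterStation", 2)),
  ("centrestation", ("CenterStation", 3)),
  ("side", ("Side", 0)),
  ("offset", ("Offset", 0)),
  ("width", ("Width", 0)),
  ("height", ("Height", 0)),
  ("bottomelevation", ("BottomElevation", 0)),
  ("invert", ("BottomElevation", 1)),
  ("baseelevation", ("BottomElevation", 2)),
  ("cover", ("Cover", 0)),
  ("rotationdeg", ("RotationDeg", 0)),
  ("rotation", ("RotationDeg", 1)),
  ("angledeg", ("RotationDeg", 2)),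
  ("behaviormode", ("BehaviorMode", 0)),
  ("mode", ("BehaviorMode", 1)),
  ("geometrymode", ("GeometryMode", 0)),
  ("geomode", ("GeometryMode", 1)),
  ("templatename", ("TemplateName", 0)),
  ("template", ("TemplateName", 1)),
  ("structuretemplate", ("TemplateName", 2)),
  ("wallthickness", ("WallThickness", 0)),
  ("wall", ("WallThickness", 1)),
  ("wallthk", ("WallThickness", 2)),
  ("footingwidth", ("FootingWidth", 0)),
  ("footing", ("FootingWidth", 1)),
  ("basewidth", ("FootingWidth", 2)),
  ("footingthickness", ("FootingThickness", 0)),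
  ("basethickness", ("FootingThickness", 1)),
  ("capheight", ("CapHeight", 0)),
  ("cap", ("CapHeight", 1)),
  ("topcapheight", ("CapHeight", 2)),
  ("cellcount", ("CellCount", 0)),
  ("cells", ("CellCount", 1)),
  ("numberofcells", ("CellCount", 2)),
  ("corridormode", ("CorridorMode", 0)),
  ("corridormodepolicy", ("CorridorMode", 1)),
  ("corridorpolicy", ("CorridorMode", 2)),
  ("corridormodevalue", ("CorridorMode", 3)),
  ("corridormargin", ("CorridorMargin", 0)),
  ("margin", ("CorridorMargin", 1)),
  ("voidmargin", ("CorridorMargin", 2)),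
  ("notes", ("Notes", 0)),
  ("note", ("Notes", 1)),
  ("remarks", ("Notes", 2)),
  ("remark", ("Notes", 3)),
  ("shapesourcepath", ("ShapeSourcePath", 0)),
  ("shapepath", ("ShapeSourcePath", 1)),
  ("sourcepath", ("ShapeSourcePath", 2)),
  ("modelpath", ("ShapeSourcePath", 3)),
  ("scalefactor", ("ScaleFactor", 0)),
  ("scale", ("ScaleFactor", 1)),
  ("placementmode", ("PlacementMode", 0)),
  ("placemode", ("PlacementMode", 1)),
  ("usesourcebaseasbottom", ("UseSourceBaseAsBottom", 0)),
  ("sourcebaseasbottom", ("UseSourceBaseAsBottom", 1)),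
  ("alignsourcebasetobottom", ("UseSourceBaseAsBottom", 2)) ]

-- Source B's _KEYS literal: the canonical keys in output order
def keysB : List String :=
  ["Id", "Type", "StartStation", "EndStation", "CenterStation", "Side", "Offset", "Width",
   "Height", "BottomElevation", "Cover", "RotationDeg", "BehaviorMode", "GeometryMode",
   "TemplateName", "WallThickness", "FootingWidth", "FootingThickness", "CapHeight",
   "CellCount", "CorridorMode", "CorridorMargin", "Notes", "ShapeSourcePath", "ScaleFactor",
   "PlacementMode", "UseSourceBaseAsBottom"]

-- loop body of B: lower rank wins; equal rank: later column wins
def updateBest (best : PySem.Dict String (Int × String)) (col : String) : PySem.Dict String (Int × String) :=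
  match invIdx.get? (normCol col) with
  | none => best
  | some kr =>
    match best.get? kr.1 with
    | none => best.insert kr.1 (kr.2, col)
    | some prev => if kr.2 ≤ prev.1 then best.insert kr.1 (kr.2, col) else best

def structure_csv_mapping_py_alt (fieldnames : List String) : List (String × Option String) :=
  let best := fieldnames.foldl updateBest PySem.Dict.empty
  -- dict comprehension over the (distinct) canonical keys, as an association list
  keysB.map (fun k => (k, (best.get? k).map (·.2)))

-- ===== PRECONDITION & SPEC =====
def Spec_structure_csv_mapping_py (fieldnames : List String) (out : List (String × Option String)) : Prop := out = structure_csv_mapping_py_alt fieldnames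
instance (fieldnames : List String) (out : List (String × Option String)) : Decidable (Spec_structure_csv_mapping_py fieldnames out) := by unfold Spec_structure_csv_mapping_py; infer_instance

-- ===== CLAIM (what is proved, stated in full; the proofs are below) =====
def Claim_equal_structure_csv_mapping_py : Prop := ∀ (fieldnames : List String), Dom_structure_csv_mapping_py fieldnames → Spec_structure_csv_mapping_py fieldnames (structure_csv_mapping_py fieldnames)

-- ===== LEMMAS AND PROOFS =====

-- facts about the fixed tables (checked by computation)
lemma table_keys_nodup : (aliasTable.map (·.1)).Nodup := by decide

lemma keysB_eq : keysB = aliasTable.map (·.1) := by decide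

lemma invIdx_enum : ∀ kc ∈ aliasTable, ∀ p ∈ PySem.List.enumerate kc.2 0,
    invIdx.get? (normCol p.2) = some (kc.1, p.1) := by decide

lemma invIdx_keys_covered : ∀ n ∈ invIdx.keys,
    ∃ kc ∈ aliasTable, ∃ a ∈ kc.2, normCol a = n := by decide

lemma alias_lookup (kc : String × List String) (hkc : kc ∈ aliasTable)
    (i : Nat) (hi : i < kc.2.length) :
    invIdx.get? (normCol kc.2[i]) = some (kc.1, (i : Int)) := by
  have h := invIdx_enum kc hkc ((0 : Int) + i, kc.2[i])
    ((PySem.List.mem_enumerate_iff _ _ _).mpr ⟨i, hi, rfl⟩)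
  simpa using h

-- invariant relating A's by_norm dict and B's best dict after any column prefix
def InvKey (bn : PySem.Dict String String) (best : PySem.Dict String (Int × String))
    (key : String) (cand : List String) : Prop :=
  match best.get? key with
  | none => ∀ a ∈ cand, bn.contains (normCol a) = false
  | some rc => ∃ i : Nat, ∃ h : i < cand.length, rc.1 = (i : Int) ∧
      bn.get? (normCol cand[i]) = some rc.2 ∧
      ∀ j : Nat, (hj : j < i) → bn.contains (normCol (cand[j]'(Nat.lt_trans hj h))) = false

def BestInv (bn : PySem.Dict String String) (best : PySem.Dict String (Int × String)) : Prop :=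
  ∀ kc ∈ aliasTable, InvKey bn best kc.1 kc.2

lemma inv_empty : BestInv PySem.Dict.empty PySem.Dict.empty := by
  intro kc _
  unfold InvKey
  simp [PySem.Dict.get?_empty, PySem.Dict.contains_empty]

lemma invKey_untouched (bn : PySem.Dict String String) (best best' : PySem.Dict String (Int × String))
    (key : String) (cand : List String) (c : String)
    (hget : best'.get? key = best.get? key)
    (hne : ∀ a ∈ cand, normCol a ≠ normCol c)
    (h : InvKey bn best key cand) : InvKey (bn.insert (normCol c) c) best' key cand := by
  unfold InvKey at h ⊢
  rw [hget]
  cases hb : best.get? key with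
  | none =>
    rw [hb] at h
    intro a ha
    rw [PySem.Dict.contains_insert]
    simp [h a ha, hne a ha]
  | some rc =>
    rw [hb] at h
    obtain ⟨i, hi, h1, h2, h3⟩ := h
    refine ⟨i, hi, h1, ?_, ?_⟩
    · rw [PySem.Dict.get?_insert_of_ne _ _ (hne _ (List.getElem_mem hi))]
      exact h2
    · intro j hj
      rw [PySem.Dict.contains_insert]
      simp [h3 j hj, hne _ (List.getElem_mem (Nat.lt_trans hj hi))]

lemma no_alias_of_none {c : String} (hid : invIdx.get? (normCol c) = none)
    (kc : String × List String) (hkc : kc ∈ aliasTable) :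
    ∀ a ∈ kc.2, normCol a ≠ normCol c := by
  intro a ha he
  obtain ⟨j, hj, rfl⟩ := List.mem_iff_getElem.mp ha
  have h := alias_lookup kc hkc j hj
  rw [he, hid] at h
  simp at h

lemma alias_eq_of_some {c : String} {kr : String × Int} (hid : invIdx.get? (normCol c) = some kr)
    (kc : String × List String) (hkc : kc ∈ aliasTable) (j : Nat) (hj : j < kc.2.length)
    (he : normCol kc.2[j] = normCol c) : kc.1 = kr.1 ∧ (j : Int) = kr.2 := by
  have h := alias_lookup kc hkc j hj
  rw [he, hid] at h
  have h' := Option.some.inj h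
  exact ⟨(congrArg Prod.fst h').symm, (congrArg Prod.snd h').symm⟩

lemma no_alias_of_other {c : String} {kr : String × Int} (hid : invIdx.get? (normCol c) = some kr)
    (kc : String × List String) (hkc : kc ∈ aliasTable) (hkey : kc.1 ≠ kr.1) :
    ∀ a ∈ kc.2, normCol a ≠ normCol c := by
  intro a ha he
  obtain ⟨j, hj, rfl⟩ := List.mem_iff_getElem.mp ha
  exact hkey (alias_eq_of_some hid kc hkc j hj he).1

lemma alias_of_some {c : String} {kr : String × Int} (hid : invIdx.get? (normCol c) = some kr)
    (kc : String × List String) (hkc : kc ∈ aliasTable) (hkey : kc.1 = kr.1) :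
    ∃ i : Nat, ∃ h : i < kc.2.length, (i : Int) = kr.2 ∧ normCol kc.2[i] = normCol c := by
  have hmem : normCol c ∈ invIdx.keys := by
    by_contra hnm
    rw [← PySem.Dict.get?_eq_none_iff_not_mem_keys] at hnm
    rw [hid] at hnm
    simp at hnm
  obtain ⟨kc', hkc', a, ha, hna⟩ := invIdx_keys_covered _ hmem
  obtain ⟨j, hj, rfl⟩ := List.mem_iff_getElem.mp ha
  have heq := alias_eq_of_some hid kc' hkc' j hj hna
  have : kc' = kc :=
    List.inj_on_of_nodup_map table_keys_nodup hkc' hkc (heq.1.trans hkey.symm)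
  subst this
  exact ⟨j, hj, heq.2, hna⟩

lemma updateBest_of_none (best : PySem.Dict String (Int × String)) (c : String)
    (hid : invIdx.get? (normCol c) = none) : updateBest best c = best := by
  unfold updateBest; rw [hid]

lemma updateBest_of_some (best : PySem.Dict String (Int × String)) (c : String)
    (kr : String × Int) (hid : invIdx.get? (normCol c) = some kr) :
    updateBest best c = (match best.get? kr.1 with
      | none => best.insert kr.1 (kr.2, c)
      | some prev => if kr.2 ≤ prev.1 then best.insert kr.1 (kr.2, c) else best) := by
  unfold updateBest; rw [hid]

lemma inv_step (bn : PySem.Dict String String) (best : PySem.Dict String (Int × String))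
    (c : String) (h : BestInv bn best) : BestInv (bn.insert (normCol c) c) (updateBest best c) := by
  intro kc hkc
  have hk := h kc hkc
  cases hid : invIdx.get? (normCol c) with
  | none =>
    rw [updateBest_of_none best c hid]
    exact invKey_untouched bn best best kc.1 kc.2 c rfl (no_alias_of_none hid kc hkc) hk
  | some kr =>
    rw [updateBest_of_some best c kr hid]
    by_cases hkey : kc.1 = kr.1
    · -- kc is the entry the new column belongs to
      obtain ⟨i, hi, hir, hnc⟩ := alias_of_some hid kc hkc hkey
      have huniq : ∀ j : Nat, (hj : j < kc.2.length) → normCol (kc.2[j]'hj) = normCol c → j = i := by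
        intro j hj hje
        have h2 := (alias_eq_of_some hid kc hkc j hj hje).2
        omega
      cases hb : best.get? kr.1 with
      | none =>
        show InvKey (bn.insert (normCol c) c) (best.insert kr.1 (kr.2, c)) kc.1 kc.2
        have hk0 : ∀ a ∈ kc.2, bn.contains (normCol a) = false := by
          unfold InvKey at hk; rw [hkey, hb] at hk; exact hk
        unfold InvKey
        rw [hkey, PySem.Dict.get?_insert_self]
        refine ⟨i, hi, hir.symm, ?_, ?_⟩
        · rw [hnc]; exact PySem.Dict.get?_insert_self _ _ _
        · intro j hj
          rw [PySem.Dict.contains_insert]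
          have hne : normCol kc.2[j] ≠ normCol c :=
            fun he => absurd (huniq j (Nat.lt_trans hj hi) he) (Nat.ne_of_lt hj)
          simp [hk0 _ (List.getElem_mem (Nat.lt_trans hj hi)), hne]
      | some prev =>
        have hkold : ∃ io : Nat, ∃ ho : io < kc.2.length, prev.1 = (io : Int) ∧
            bn.get? (normCol kc.2[io]) = some prev.2 ∧
            ∀ j : Nat, (hj : j < io) → bn.contains (normCol (kc.2[j]'(Nat.lt_trans hj ho))) = false := by
          unfold InvKey at hk; rw [hkey, hb] at hk; exact hk
        obtain ⟨io, ho, ho1, ho2, ho3⟩ := hkold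
        show InvKey (bn.insert (normCol c) c)
          (if kr.2 ≤ prev.1 then best.insert kr.1 (kr.2, c) else best) kc.1 kc.2
        by_cases hrank : kr.2 ≤ prev.1
        · rw [if_pos hrank]
          have hile : i ≤ io := by omega
          unfold InvKey
          rw [hkey, PySem.Dict.get?_insert_self]
          refine ⟨i, hi, hir.symm, ?_, ?_⟩
          · rw [hnc]; exact PySem.Dict.get?_insert_self _ _ _
          · intro j hj
            rw [PySem.Dict.contains_insert]
            have hne : normCol kc.2[j] ≠ normCol c :=
              fun he => absurd (huniq j (Nat.lt_trans hj hi) he) (Nat.ne_of_lt hj)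
            simp [ho3 j (Nat.lt_of_lt_of_le hj hile), hne]
        · rw [if_neg hrank]
          have hlt : io < i := by omega
          unfold InvKey
          rw [hkey, hb]
          refine ⟨io, ho, ho1, ?_, ?_⟩
          · rw [PySem.Dict.get?_insert_of_ne _ _
              (fun he => absurd (huniq io ho he) (Nat.ne_of_lt hlt))]
            exact ho2
          · intro j hj
            rw [PySem.Dict.contains_insert]
            have hne : normCol kc.2[j] ≠ normCol c :=
              fun he => absurd (huniq j (Nat.lt_trans hj ho) he)
                (Nat.ne_of_lt (Nat.lt_trans hj hlt))
            simp [ho3 j hj, hne]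
    · -- kc is untouched by this column
      have hne := no_alias_of_other hid kc hkc hkey
      cases hb : best.get? kr.1 with
      | none =>
        show InvKey (bn.insert (normCol c) c) (best.insert kr.1 (kr.2, c)) kc.1 kc.2
        exact invKey_untouched bn best _ kc.1 kc.2 c
          (PySem.Dict.get?_insert_of_ne _ _ hkey) hne hk
      | some prev =>
        show InvKey (bn.insert (normCol c) c)
          (if kr.2 ≤ prev.1 then best.insert kr.1 (kr.2, c) else best) kc.1 kc.2
        by_cases hrank : kr.2 ≤ prev.1
        · rw [if_pos hrank]
          exact invKey_untouched bn best _ kc.1 kc.2 c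
            (PySem.Dict.get?_insert_of_ne _ _ hkey) hne hk
        · rw [if_neg hrank]
          exact invKey_untouched bn best best kc.1 kc.2 c rfl hne hk

lemma inv_foldl (cols : List String) (bn : PySem.Dict String String)
    (best : PySem.Dict String (Int × String)) (h : BestInv bn best) :
    BestInv (cols.foldl (fun d c => d.insert (normCol c) c) bn) (cols.foldl updateBest best) := by
  induction cols generalizing bn best with
  | nil => exact h
  | cons c rest ih =>
    simp only [List.foldl_cons]
    exact ih _ _ (inv_step bn best c h)

lemma firstHit_none (bn : PySem.Dict String String) (cand : List String)
    (h : ∀ a ∈ cand, bn.contains (normCol a) = false) : firstHitA bn cand = none := by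
  induction cand with
  | nil => rfl
  | cons a rest ih =>
    have h0 := h a (by simp)
    simp only [firstHitA, h0, Bool.false_eq_true, if_false]
    exact ih fun x hx => h x (List.mem_cons_of_mem _ hx)

lemma firstHit_idx (bn : PySem.Dict String String) (cand : List String) (c : String)
    (i : Nat) (hi : i < cand.length)
    (hpre : ∀ j : Nat, (hj : j < i) → bn.contains (normCol (cand[j]'(Nat.lt_trans hj hi))) = false)
    (hc : bn.get? (normCol cand[i]) = some c) : firstHitA bn cand = some c := by
  induction cand generalizing i with
  | nil => exact absurd hi (Nat.not_lt_zero i)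
  | cons a rest ih =>
    cases i with
    | zero =>
      simp only [List.getElem_cons_zero] at hc
      have hcon : bn.contains (normCol a) = true := by
        rw [PySem.Dict.contains_eq_isSome_get?, hc]; rfl
      simp [firstHitA, hcon, hc]
    | succ j =>
      have hhead : bn.contains (normCol a) = false := hpre 0 (Nat.succ_pos j)
      simp only [firstHitA, hhead, Bool.false_eq_true, if_false]
      exact ih j (Nat.lt_of_succ_lt_succ hi)
        (fun k hk => hpre (k + 1) (Nat.succ_lt_succ hk)) hc

lemma firstHit_eq (bn : PySem.Dict String String) (best : PySem.Dict String (Int × String))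
    (key : String) (cand : List String) (h : InvKey bn best key cand) :
    firstHitA bn cand = (best.get? key).map (·.2) := by
  unfold InvKey at h
  cases hb : best.get? key with
  | none => rw [hb] at h; simpa using firstHit_none bn cand h
  | some rc =>
    rw [hb] at h
    obtain ⟨i, hi, _, hg, hpre⟩ := h
    simpa using firstHit_idx bn cand rc.2 i hi hpre hg

-- ===== VERDICT (by name: the statement is the Claim_ definition above) =====
theorem structure_csv_mapping_py_spec : Claim_equal_structure_csv_mapping_py := by
  intro cols _hdom
  show structure_csv_mapping_py cols = structure_csv_mapping_py_alt cols
  simp only [structure_csv_mapping_py, structure_csv_mapping_py_alt]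
  rw [PySem.Dict.items_foldl_insert_fresh aliasTable (fun kc => kc.1)
      (fun kc => firstHitA (cols.foldl (fun d c => d.insert (normCol c) c) PySem.Dict.empty) kc.2)
      PySem.Dict.empty (fun a _ => PySem.Dict.contains_empty a.1) table_keys_nodup]
  have hInv := inv_foldl cols PySem.Dict.empty PySem.Dict.empty inv_empty
  have hitems : PySem.Dict.empty.items = ([] : List (String × Option String)) := rfl
  rw [hitems, List.nil_append, keysB_eq, List.map_map]
  apply List.map_congr_left
  intro kc hkc
  exact congrArg (fun o => (kc.1, o)) (firstHit_eq _ _ kc.1 kc.2 (hInv kc hkc))
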